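-- pv_equiv track=rewrite | github.com/skytreader/programming_praxis | cryptography/double_transposition_cypher.py | grid_laydown
-- ===== SOURCE A (Python) =====
-- def grid_laydown(plaintext, keylen):
-- 	"""
-- 	Lays down the given plaintext in a grid based on the given key
-- 	length. The text is laid-down left-to-right, top-to-bottom.
--
-- 	Returns a list of strings. Each string is one column. The columns are
-- 	arranged from left to right.
-- 	"""
-- 	grid = ["" for i in range(keylen)]
-- 	i = 0
-- 	limit = len(plaintext)
--
-- 	while i < limit:
-- 		grid[i % keylen] += plaintext[i]
-- 		i += 1
--
-- 	return grid
-- ===== SOURCE B (Python) =====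
-- def grid_laydown(plaintext, keylen):
--     """Per-column passes: column j collects plaintext[j], plaintext[j+keylen], ..."""
--     def column(j):
--         chars = []
--         while j < len(plaintext):
--             chars.append(plaintext[j])
--             j += keylen
--         return "".join(chars)
--     return [column(j) for j in range(keylen)]
-- ===== Notes on version B (the rewrite author's own statement) =====
-- stated objective: alternative
-- what changed: B builds each column in its own strided pass (plaintext[j], plaintext[j+keylen], ...) instead of A's single interleaved character-by-character round-robin loop that appends to all columns in turn.
import Mathlib
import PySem

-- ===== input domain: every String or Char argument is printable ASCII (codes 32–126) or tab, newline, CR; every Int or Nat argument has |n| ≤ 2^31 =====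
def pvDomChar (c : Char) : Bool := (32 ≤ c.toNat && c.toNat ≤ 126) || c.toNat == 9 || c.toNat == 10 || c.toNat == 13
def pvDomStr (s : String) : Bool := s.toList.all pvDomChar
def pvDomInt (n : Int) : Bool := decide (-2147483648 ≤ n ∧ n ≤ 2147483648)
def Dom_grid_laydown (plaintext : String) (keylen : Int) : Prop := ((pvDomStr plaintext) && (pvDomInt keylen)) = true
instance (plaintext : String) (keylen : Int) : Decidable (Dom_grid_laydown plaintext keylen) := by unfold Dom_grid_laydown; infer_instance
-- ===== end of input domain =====

-- B lays each column down in its own strided pass instead of A's single interleaved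
-- round-robin loop; same return value wherever A returns (objective: alternative).

-- ===== PORT A =====
-- A's while loop: one step per remaining character; grid[i % keylen] += plaintext[i]; i += 1.
-- PySem.Int.mod / pyGetD / pySetD are exact where Python's `%` and indexing succeed; the
-- pyGetD/pySetD defaults are only reachable where Python A raises (excluded by Pre_).
def gridLoopA (grid : List String) (keylen : Int) (cs : List Char) (i : Int) : List String :=
  match cs with
  | [] => grid
  | c :: rest =>
      let j := PySem.Int.mod i keylen
      gridLoopA (PySem.List.pySetD grid j ((PySem.List.pyGetD grid j "").push c)) keylen rest (i + 1)

def grid_laydown (plaintext : String) (keylen : Int) : List String :=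
  gridLoopA ((PySem.List.pyRange 0 keylen 1).map (fun _ => "")) keylen plaintext.toList 0

-- ===== PORT B =====
-- B's inner while loop `while j < len: take plaintext[j]; j += keylen`, expressed on the
-- remaining suffix of the character list (exact for the calls B makes: 0 ≤ j, 1 ≤ keylen).
def colChars (cs : List Char) (k : Nat) : List Char :=
  match cs with
  | [] => []
  | c :: rest => c :: colChars (rest.drop (k - 1)) k
termination_by cs.length
decreasing_by simp

def grid_laydown_alt (plaintext : String) (keylen : Int) : List String :=
  (PySem.List.pyRange 0 keylen 1).map
    (fun j => String.ofList (colChars (plaintext.toList.drop j.toNat) keylen.toNat))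

-- ===== PRECONDITION & SPEC =====
-- Pre_ excludes exactly the inputs where A raises: keylen ≤ 0 with nonempty plaintext
-- (ZeroDivisionError for keylen = 0, IndexError for keylen < 0).
def Pre_grid_laydown (plaintext : String) (keylen : Int) : Prop :=
  1 ≤ keylen ∨ plaintext = ""
instance (plaintext : String) (keylen : Int) : Decidable (Pre_grid_laydown plaintext keylen) := by
  unfold Pre_grid_laydown; infer_instance

def pvWitness_grid_laydown : String × Int := ("HELLO WORLD", 3)

def Spec_grid_laydown (plaintext : String) (keylen : Int) (out : List String) : Prop := out = grid_laydown_alt plaintext keylen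
instance (plaintext : String) (keylen : Int) (out : List String) : Decidable (Spec_grid_laydown plaintext keylen out) := by unfold Spec_grid_laydown; infer_instance

-- ===== CLAIM (what is proved, stated in full; the proofs are below) =====
def Claim_equal_grid_laydown : Prop := ∀ (plaintext : String) (keylen : Int), Dom_grid_laydown plaintext keylen → Pre_grid_laydown plaintext keylen → Spec_grid_laydown plaintext keylen (grid_laydown plaintext keylen)

-- ===== LEMMAS AND PROOFS =====

-- strings: appending a fresh character list, one character at a time
lemma str_append_ofList_cons (s : String) (c : Char) (l : List Char) :
    s ++ String.ofList (c :: l) = s.push c ++ String.ofList l := by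
  rw [← String.toList_inj]; simp

lemma str_append_ofList_nil (s : String) : s ++ String.ofList ([] : List Char) = s := by
  rw [← String.toList_inj]; simp

lemma str_empty_append (s : String) : "" ++ s = s := by
  rw [← String.toList_inj]; simp

-- Int.emod bookkeeping for the round-robin index
lemma emod_sub_emod (a b k : Int) : (a - b % k) % k = (a - b) % k := by
  rw [show a - b = a - b % k + k * (-(b / k)) from by
    have h := Int.mul_ediv_add_emod b k; linarith, Int.add_mul_emod_self_left]

lemma emod_small (k a : Int) (_hk : 0 < k) (h1 : -k < a) (h2 : a < k) :
    a % k = if 0 ≤ a then a else a + k := by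
  split_ifs with h
  · exact Int.emod_eq_of_lt h h2
  · calc a % k = (a + k * 1) % k := (Int.add_mul_emod_self_left ..).symm
      _ = (a + k) % k := by ring_nf
      _ = a + k := Int.emod_eq_of_lt (by omega) (by omega)

lemma emod_pred_key (k x : Int) : (x - 1) % k = (x % k - 1) % k := by
  rw [show x - 1 = x % k - 1 + k * (x / k) from by
    have h := Int.mul_ediv_add_emod x k; linarith, Int.add_mul_emod_self_left]

lemma emod_pred (k x : Int) (hk : 0 < k) (h : 1 ≤ x % k) : (x - 1) % k = x % k - 1 := by
  have h2 : x % k < k := Int.emod_lt_of_pos x hk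
  rw [emod_pred_key, Int.emod_eq_of_lt (by omega) (by omega)]

lemma emod_zero_pred (k x : Int) (hk : 0 < k) (h : x % k = 0) : (x - 1) % k = k - 1 := by
  rw [emod_pred_key, h]
  calc (0 - 1 : Int) % k = (k - 1 + k * (-1)) % k := by ring_nf
    _ = (k - 1) % k := Int.add_mul_emod_self_left ..
    _ = k - 1 := Int.emod_eq_of_lt (by omega) (by omega)

-- a list of length k is the table of its own entries
lemma list_eq_map_range_getD (g : List String) (k : Nat) (h : g.length = k) :
    g = (List.range k).map (fun j => g.getD j "") := by
  apply List.ext_getElem (by simp [h])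
  intro n h1 h2
  simp only [List.getElem_map, List.getElem_range]
  rw [List.getD_eq_getElem g "" (by omega)]

-- loop invariant: after laying down cs starting at absolute position i, column j holds its
-- old contents followed by the strided selection of cs starting at offset (j - i) mod k
lemma gridLoopA_eq_cols (k : Nat) (hk : 0 < k) (cs : List Char) :
    ∀ (g : List String) (i : Int), 0 ≤ i → g.length = k →
    gridLoopA g (k : Int) cs i =
      (List.range k).map
        (fun j => g.getD j "" ++
          String.ofList (colChars (cs.drop (((j : Int) - i) % (k : Int)).toNat) k)) := by
  induction cs with
  | nil =>
      intro g i hi hg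
      simp only [gridLoopA, List.drop_nil]
      rw [show colChars [] k = [] from by simp [colChars]]
      conv_lhs => rw [list_eq_map_range_getD g k hg]
      exact List.map_congr_left (fun j _ => (str_append_ofList_nil _).symm)
  | cons c rest ih =>
      intro g i hi hg
      have hkz : (0:Int) < (k:Int) := by exact_mod_cast hk
      simp only [gridLoopA]
      rw [PySem.Int.mod_eq_emod_of_pos hkz]
      set r : Int := i % (k:Int) with hrdef
      have hr0 : 0 ≤ r := Int.emod_nonneg i (by omega)
      have hrk : r < (k:Int) := Int.emod_lt_of_pos i hkz
      set v : String := (PySem.List.pyGetD g r "").push c with hv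
      rw [PySem.List.pySetD_of_nonneg g v hr0]
      rw [ih (g.set r.toNat v) (i+1) (by omega) (by simp [hg])]
      apply List.map_congr_left
      intro j hj
      have hjk : j < k := List.mem_range.mp hj
      have hm : ((j:Int) - i) % (k:Int) = ((j:Int) - r) % (k:Int) := by
        rw [hrdef]; exact (emod_sub_emod (j:Int) i (k:Int)).symm
      have hsmall := emod_small (k:Int) ((j:Int) - r) hkz (by omega) (by omega)
      by_cases hcase : (j:Int) = r
      · -- this step wrote into column j
        have hm0 : ((j:Int) - i) % (k:Int) = 0 := by
          rw [hm, ← hcase]; simp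
        have hidx : r.toNat = j := by omega
        have hm1 : ((j:Int) - (i+1)) % (k:Int) = (k:Int) - 1 := by
          rw [show (j:Int) - (i+1) = ((j:Int) - i) - 1 from by ring]
          exact emod_zero_pred _ _ hkz hm0
        rw [hm0, hm1, hidx]
        have hset : (g.set j v).getD j "" = v := by
          rw [List.getD_eq_getElem _ _ (by simp [hg]; omega), List.getElem_set]; simp
        rw [hset]
        have hget : PySem.List.pyGetD g r "" = g.getD j "" := by
          rw [← hidx, PySem.List.pyGetD_eq_getElem g "" hr0 (by omega),
            List.getD_eq_getElem g "" (by omega)]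
        rw [show ((0:Int)).toNat = 0 from rfl, List.drop_zero,
          show (((k:Int) - 1)).toNat = k - 1 from by omega,
          show colChars (c :: rest) k = c :: colChars (rest.drop (k - 1)) k from by
            simp [colChars]]
        rw [str_append_ofList_cons, hv, hget]
      · -- untouched column
        have hne : r.toNat ≠ j := by omega
        have hmne : ((j:Int) - i) % (k:Int) ≠ 0 := by
          rw [hm, hsmall]; split_ifs <;> omega
        have hm1le : 1 ≤ ((j:Int) - i) % (k:Int) := by
          have h0 := Int.emod_nonneg ((j:Int) - i) (show (k:Int) ≠ 0 from by omega)
          omega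
        have hmlt : ((j:Int) - i) % (k:Int) < (k:Int) :=
          Int.emod_lt_of_pos _ hkz
        have hm1 : ((j:Int) - (i+1)) % (k:Int) = ((j:Int) - i) % (k:Int) - 1 := by
          rw [show (j:Int) - (i+1) = ((j:Int) - i) - 1 from by ring]
          exact emod_pred _ _ hkz hm1le
        have hset : (g.set r.toNat v).getD j "" = g.getD j "" := by
          rw [List.getD_eq_getElem _ _ (by simp [hg]; omega), List.getElem_set_ne hne,
            List.getD_eq_getElem g "" (by omega)]
        rw [hset, hm1]
        congr 2
        rw [show (((j:Int) - i) % (k:Int)).toNat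
              = ((((j:Int) - i) % (k:Int) - 1).toNat) + 1 from by omega,
          List.drop_succ_cons]

theorem grid_laydown_spec : Claim_equal_grid_laydown := by
  intro p keylen hdom hpre
  show grid_laydown p keylen = grid_laydown_alt p keylen
  by_cases hk1 : 1 ≤ keylen
  · have hcast : ((keylen.toNat : Int)) = keylen := Int.toNat_of_nonneg (by omega)
    set k : Nat := keylen.toNat with hkdef
    have hkpos : 0 < k := by omega
    unfold grid_laydown grid_laydown_alt
    rw [← hcast, PySem.List.pyRange_zero_nat k, List.map_map, List.map_map]
    rw [gridLoopA_eq_cols k hkpos _ _ 0 (by omega) (by simp)]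
    apply List.map_congr_left
    intro j hj
    have hjk : j < k := List.mem_range.mp hj
    have hg0 : (List.map ((fun _ => "") ∘ fun (m : Nat) => ((m : Int))) (List.range k)).getD j "" = "" := by
      rw [List.getD_eq_getElem _ _ (by simp; omega)]
      simp
    rw [hg0, str_empty_append]
    have hj0 : (((j : Int) - 0) % (k : Int)).toNat = j := by
      rw [show ((j : Int) - 0) = (j : Int) from by ring,
        Int.emod_eq_of_lt (by omega) (by exact_mod_cast hjk)]
      omega
    rw [hj0]
    simp
  · rcases hpre with h | h
    · omega
    · subst h
      unfold grid_laydown grid_laydown_alt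
      rw [show ("" : String).toList = [] from by simp]
      rw [show ∀ g i, gridLoopA g keylen [] i = g from fun _ _ => rfl]
      apply List.map_congr_left
      intro j _
      rw [List.drop_nil, show colChars [] keylen.toNat = [] from by simp [colChars]]
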